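-- pv_equiv track=rewrite | github.com/YounoussaBen/classical_cipher_cryptanalysis_backend | app/services/engines/polyalphabetic/vigenere.py | _analyze_kasiski
-- ===== SOURCE A (Python) =====
-- def _analyze_kasiski(distances: list[int], max_length: int) -> set[int]:
--     """Find likely key lengths from Kasiski distances using GCD."""
--     if not distances:
--         return set()
--
--     likely = set()
--
--     # Find common factors of distances
--     for d in distances:
--         for factor in range(2, min(d + 1, max_length + 1)):
--             if d % factor == 0:
--                 likely.add(factor)
--
--     return likely
-- ===== SOURCE B (Python) =====
-- def _analyze_kasiski(distances: list[int], max_length: int) -> set[int]: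
--     """Find likely key lengths from Kasiski distances using GCD."""
--     if not distances:
--         return set()
--
--     likely = set()
--
--     # Alternative algorithm: enumerate the divisors of each distance in pairs up to sqrt(d),
--     # then keep those in [2, max_length].
--     for d in distances:
--         divs = set()
--         i = 1
--         while i * i <= d:
--             if d % i == 0:
--                 divs.add(i)
--                 divs.add(d // i)
--             i += 1
--         for f in sorted(divs):
--             if 2 <= f <= max_length:
--                 likely.add(f)
--
--     return likely
-- ===== Notes on version B (the rewrite author's own statement) =====
-- stated objective: alternative
-- what changed: Instead of testing every candidate factor in range(2, min(d, max_length)+1), B enumerates divisors of each distance in pairs (i, d//i) up to sqrt(d) and filters them by max_length.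
import Mathlib
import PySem

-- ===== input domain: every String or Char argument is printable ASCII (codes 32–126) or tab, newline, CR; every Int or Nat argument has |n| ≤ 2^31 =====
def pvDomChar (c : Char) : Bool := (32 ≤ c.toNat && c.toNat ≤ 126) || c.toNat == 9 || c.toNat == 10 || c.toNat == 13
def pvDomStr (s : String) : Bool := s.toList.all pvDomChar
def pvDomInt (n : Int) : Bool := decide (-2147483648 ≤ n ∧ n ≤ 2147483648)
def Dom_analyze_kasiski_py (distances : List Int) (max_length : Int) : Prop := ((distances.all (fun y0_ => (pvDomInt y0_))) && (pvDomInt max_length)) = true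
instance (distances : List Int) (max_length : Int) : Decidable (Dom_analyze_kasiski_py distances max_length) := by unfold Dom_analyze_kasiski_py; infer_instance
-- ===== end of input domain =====

-- B enumerates divisors of each distance in pairs (i, d//i) up to sqrt(d) instead of
-- testing every candidate in range(2, min(d, max_length)+1) (alternative algorithm).
-- Return type is a Python set, ported as PySem.Set Int (list of distinct elements).

-- ===== PORT A =====
def analyze_kasiski_py (distances : List Int) (max_length : Int) : List Int :=
  if distances = [] then PySem.Set.empty
  else
    distances.foldl
      (fun likely d =>
        (PySem.List.pyRange 2 (min (d + 1) (max_length + 1)) 1).foldl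
          (fun s factor => if PySem.Int.mod d factor = 0 then PySem.Set.add s factor else s)
          likely)
      PySem.Set.empty

-- ===== PORT B =====
-- the 'while i * i <= d' loop of Source B, collecting divisor pairs (i, d // i)
def pvCollectDivs (d : Int) (i : Int) (divs : PySem.Set Int) : PySem.Set Int :=
  if h : i * i ≤ d then
    pvCollectDivs d (i + 1)
      (if PySem.Int.mod d i = 0 then
        PySem.Set.add (PySem.Set.add divs i) (PySem.Int.floordiv d i)
      else divs)
  else divs
termination_by (d + 2 - i).toNat
decreasing_by
  have hi : i ≤ d + 1 := by nlinarith [sq_nonneg i, sq_nonneg (i - 1)]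
  omega

def analyze_kasiski_py_alt (distances : List Int) (max_length : Int) : List Int :=
  if distances = [] then PySem.Set.empty
  else
    distances.foldl
      (fun likely d =>
        (PySem.List.sorted (pvCollectDivs d 1 PySem.Set.empty) (fun x => x) false).foldl
          (fun s f => if 2 ≤ f ∧ f ≤ max_length then PySem.Set.add s f else s)
          likely)
      PySem.Set.empty

-- ===== PRECONDITION & SPEC =====
def Spec_analyze_kasiski_py (distances : List Int) (max_length : Int) (out : List Int) : Prop := out = analyze_kasiski_py_alt distances max_length
instance (distances : List Int) (max_length : Int) (out : List Int) : Decidable (Spec_analyze_kasiski_py distances max_length out) := by unfold Spec_analyze_kasiski_py; infer_instance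

-- ===== CLAIM (what is proved, stated in full; the proofs are below) =====
def Claim_equal_analyze_kasiski_py : Prop := ∀ (distances : List Int) (max_length : Int), Dom_analyze_kasiski_py distances max_length → Spec_analyze_kasiski_py distances max_length (analyze_kasiski_py distances max_length)

-- ===== LEMMAS AND PROOFS =====

-- a conditional-add loop over a set is an add-loop over the filtered list
theorem foldl_ite_add_filter (p : Int → Prop) [DecidablePred p] (l : List Int)
    (s : PySem.Set Int) :
    l.foldl (fun s x => if p x then PySem.Set.add s x else s) s
      = (l.filter (fun x => decide (p x))).foldl PySem.Set.add s := by
  induction l generalizing s with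
  | nil => rfl
  | cons a t ih =>
      by_cases ha : p a <;> simp [ha, ih]

-- membership in the divisor-collecting loop (started at any i >= 1)
theorem mem_pvCollectDivs (d x : Int) : ∀ (i : Int) (s : PySem.Set Int), 1 ≤ i →
    (x ∈ pvCollectDivs d i s ↔
      x ∈ s ∨ ∃ j, i ≤ j ∧ j * j ≤ d ∧ PySem.Int.mod d j = 0 ∧
        (x = j ∨ x = PySem.Int.floordiv d j)) := by
  intro i s
  induction i, s using pvCollectDivs.induct d with
  | case1 i s h ih =>
      intro hi
      rw [pvCollectDivs, dif_pos h]
      by_cases hm : PySem.Int.mod d i = 0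
      · rw [if_pos hm]
        rw [dif_pos hm] at ih
        rw [ih (by omega)]
        simp only [PySem.Set.mem_add]
        constructor
        · rintro (((hx | hx) | hx) | ⟨j, hj1, hj2, hj3, hj4⟩)
          · exact Or.inl hx
          · exact Or.inr ⟨i, le_refl i, h, hm, Or.inl hx⟩
          · exact Or.inr ⟨i, le_refl i, h, hm, Or.inr hx⟩
          · exact Or.inr ⟨j, by omega, hj2, hj3, hj4⟩
        · rintro (hx | ⟨j, hj1, hj2, hj3, hj4⟩)
          · exact Or.inl (Or.inl (Or.inl hx))
          · rcases eq_or_lt_of_le hj1 with heq | hlt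
            · subst heq
              rcases hj4 with hx | hx
              · exact Or.inl (Or.inl (Or.inr hx))
              · exact Or.inl (Or.inr hx)
            · exact Or.inr ⟨j, by omega, hj2, hj3, hj4⟩
      · rw [if_neg hm]
        rw [dif_neg hm] at ih
        rw [ih (by omega)]
        constructor
        · rintro (hx | ⟨j, hj⟩)
          · exact Or.inl hx
          · exact Or.inr ⟨j, by omega, hj.2⟩
        · rintro (hx | ⟨j, hj1, hj2, hj3, hj4⟩)
          · exact Or.inl hx
          · rcases eq_or_lt_of_le hj1 with heq | hlt
            · exact absurd (heq ▸ hj3) hm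
            · exact Or.inr ⟨j, by omega, hj2, hj3, hj4⟩
  | case2 i s h =>
      intro hi
      rw [pvCollectDivs, dif_neg h]
      constructor
      · exact Or.inl
      · rintro (hx | ⟨j, hj1, hj2, _, _⟩)
        · exact hx
        · exfalso
          have hji : 0 ≤ (j - i) * (j + i) := by
            refine mul_nonneg (by omega) (by omega)
          nlinarith

-- the collected elements are exactly the positive divisors of a positive d
theorem div_pair_char (d x : Int) :
    (∃ j, 1 ≤ j ∧ j * j ≤ d ∧ PySem.Int.mod d j = 0 ∧
        (x = j ∨ x = PySem.Int.floordiv d j)) ↔ (0 < d ∧ 0 < x ∧ x ∣ d) := by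
  constructor
  · rintro ⟨j, hj1, hjj, hmod, hx⟩
    have hjd : j ∣ d := (PySem.Int.mod_eq_zero_iff_dvd d j).mp hmod
    have hd : 0 < d := lt_of_lt_of_le (by nlinarith) hjj
    obtain ⟨c, hc⟩ := hjd
    have hc0 : 0 < c := by nlinarith
    have hfd : PySem.Int.floordiv d j = c := by
      rw [PySem.Int.floordiv_eq_ediv_of_pos (by omega), hc,
        Int.mul_ediv_cancel_left c (by omega)]
    rcases hx with rfl | rfl
    · exact ⟨hd, by omega, ⟨c, hc⟩⟩
    · rw [hfd]; exact ⟨hd, hc0, ⟨j, by rw [hc]; ring⟩⟩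
  · rintro ⟨hd, hx, hdvd⟩
    obtain ⟨c, hc⟩ := hdvd
    have hc0 : 0 < c := by nlinarith
    by_cases hxx : x * x ≤ d
    · exact ⟨x, by omega, hxx,
        (PySem.Int.mod_eq_zero_iff_dvd d x).mpr ⟨c, hc⟩, Or.inl rfl⟩
    · refine ⟨c, by omega, ?_, ?_, Or.inr ?_⟩
      · nlinarith
      · exact (PySem.Int.mod_eq_zero_iff_dvd d c).mpr ⟨x, by rw [hc]; ring⟩
      · rw [PySem.Int.floordiv_eq_ediv_of_pos hc0, hc,
          Int.mul_ediv_cancel x (by omega)]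

-- the set invariant is preserved by the loop
theorem nodup_pvCollectDivs (d : Int) : ∀ (i : Int) (s : PySem.Set Int), s.Nodup →
    (pvCollectDivs d i s).Nodup := by
  intro i s
  induction i, s using pvCollectDivs.induct d with
  | case1 i s h ih =>
      intro hs
      rw [pvCollectDivs, dif_pos h]
      by_cases hm : PySem.Int.mod d i = 0
      · rw [if_pos hm]
        rw [dif_pos hm] at ih
        exact ih (PySem.Set.nodup_add _ _ (PySem.Set.nodup_add _ _ hs))
      · rw [if_neg hm]
        rw [dif_neg hm] at ih
        exact ih hs
  | case2 i s h =>
      intro hs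
      rw [pvCollectDivs, dif_neg h]
      exact hs

-- the two per-distance filtered lists coincide
theorem filtered_lists_eq (d ml : Int) :
    (PySem.List.pyRange 2 (min (d + 1) (ml + 1)) 1).filter
        (fun x => decide (PySem.Int.mod d x = 0))
      = (PySem.List.sorted (pvCollectDivs d 1 PySem.Set.empty) (fun x => x) false).filter
          (fun f => decide (2 ≤ f ∧ f ≤ ml)) := by
  have hSperm := PySem.List.sorted_perm (pvCollectDivs d 1 PySem.Set.empty) (fun x => x) false
  have hSnd : (PySem.List.sorted (pvCollectDivs d 1 PySem.Set.empty) (fun x => x) false).Nodup :=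
    hSperm.nodup_iff.mpr (nodup_pvCollectDivs d 1 PySem.Set.empty List.nodup_nil)
  have hSle := PySem.List.sorted_pairwise (pvCollectDivs d 1 PySem.Set.empty) (fun x => x)
  have hSlt : (PySem.List.sorted (pvCollectDivs d 1 PySem.Set.empty) (fun x => x) false).Pairwise (· < ·) :=
    (hSle.and hSnd).imp (fun h => lt_of_le_of_ne h.1 h.2)
  have hAlt : ((PySem.List.pyRange 2 (min (d + 1) (ml + 1)) 1).filter
      (fun x => decide (PySem.Int.mod d x = 0))).Pairwise (· < ·) :=
    (PySem.List.pairwise_lt_pyRange_one 2 (min (d + 1) (ml + 1))).filter _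
  have hBlt : ((PySem.List.sorted (pvCollectDivs d 1 PySem.Set.empty) (fun x => x) false).filter
      (fun f => decide (2 ≤ f ∧ f ≤ ml))).Pairwise (· < ·) := hSlt.filter _
  have hmem : ∀ x : Int,
      x ∈ (PySem.List.pyRange 2 (min (d + 1) (ml + 1)) 1).filter
        (fun x => decide (PySem.Int.mod d x = 0)) ↔
      x ∈ (PySem.List.sorted (pvCollectDivs d 1 PySem.Set.empty) (fun x => x) false).filter
        (fun f => decide (2 ≤ f ∧ f ≤ ml)) := by
    intro x
    simp only [List.mem_filter, PySem.List.mem_pyRange_one, PySem.List.mem_sorted,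
      decide_eq_true_eq]
    rw [mem_pvCollectDivs d x 1 PySem.Set.empty (le_refl 1)]
    simp only [PySem.Set.empty, List.not_mem_nil, false_or]
    rw [div_pair_char]
    constructor
    · rintro ⟨⟨h2, hmin⟩, hmod⟩
      have hdvd : x ∣ d := (PySem.Int.mod_eq_zero_iff_dvd d x).mp hmod
      exact ⟨⟨by omega, by omega, hdvd⟩, by omega, by omega⟩
    · rintro ⟨⟨hd, hx, hdvd⟩, h2, hml⟩
      have hxd : x ≤ d := Int.le_of_dvd hd hdvd
      exact ⟨⟨by omega, by omega⟩, (PySem.Int.mod_eq_zero_iff_dvd d x).mpr hdvd⟩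
  exact List.Perm.eq_of_pairwise
    (fun a b _ _ h1 h2 => absurd h1 (not_lt.mpr h2.le))
    hAlt hBlt
    ((List.perm_ext_iff_of_nodup (hAlt.imp ne_of_lt) (hBlt.imp ne_of_lt)).mpr hmem)

-- the two per-distance loop bodies coincide on every accumulator
theorem inner_eq (ml d : Int) (likely : PySem.Set Int) :
    (PySem.List.pyRange 2 (min (d + 1) (ml + 1)) 1).foldl
        (fun s factor => if PySem.Int.mod d factor = 0 then PySem.Set.add s factor else s)
        likely
      = (PySem.List.sorted (pvCollectDivs d 1 PySem.Set.empty) (fun x => x) false).foldl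
          (fun s f => if 2 ≤ f ∧ f ≤ ml then PySem.Set.add s f else s) likely := by
  rw [foldl_ite_add_filter (fun x => PySem.Int.mod d x = 0),
    foldl_ite_add_filter (fun f => 2 ≤ f ∧ f ≤ ml),
    filtered_lists_eq d ml]

theorem analyze_kasiski_eq (distances : List Int) (max_length : Int) :
    analyze_kasiski_py distances max_length = analyze_kasiski_py_alt distances max_length := by
  unfold analyze_kasiski_py analyze_kasiski_py_alt
  split
  · rfl
  · have h : (fun (likely : PySem.Set Int) (d : Int) =>
        (PySem.List.pyRange 2 (min (d + 1) (max_length + 1)) 1).foldl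
          (fun s factor => if PySem.Int.mod d factor = 0 then PySem.Set.add s factor else s)
          likely)
        = (fun (likely : PySem.Set Int) (d : Int) =>
        (PySem.List.sorted (pvCollectDivs d 1 PySem.Set.empty) (fun x => x) false).foldl
          (fun s f => if 2 ≤ f ∧ f ≤ max_length then PySem.Set.add s f else s) likely) := by
      funext likely d
      exact inner_eq max_length d likely
    rw [h]

-- ===== VERDICT (by name: the statement is the Claim_ definition above) =====
theorem analyze_kasiski_py_spec : Claim_equal_analyze_kasiski_py := by
  intro distances max_length _
  exact analyze_kasiski_eq distances max_length
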